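-- pv_equiv track=rewrite | github.com/ilkka-torma/diddy | experimental/tfg_nontriv.py | in_sft_language
-- ===== SOURCE A (Python) =====
-- def in_sft_language(word, sft):
--     for a in word:
--         if a not in sft[0]:
--             return False
--     for f in sft[1]:
--         for i in range(len(word) - len(f) + 1):
--             if word[i:i+len(f)] == f:
--                 return False
--     return True
-- ===== SOURCE B (Python) =====
-- def in_sft_language(word, sft):
--     alphabet, forbidden = sft[0], sft[1]
--     if set(word) - set(alphabet):
--         return False
--     lengths = {len(f) for f in forbidden}
--     factors = {word[i:i+L] for L in lengths for i in range(len(word) - L + 1)}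
--     return not (factors & set(forbidden))
-- ===== Notes on version B (the rewrite author's own statement) =====
-- stated objective: alternative
-- what changed: A scans the word per character against the alphabet list and, per forbidden word, re-scans every position comparing slices; B instead checks the alphabet with one set difference and replaces the per-pattern scans by a factor index: it builds, once per distinct forbidden length, the set of all factors of the word of that length and answers by intersecting that factor set with the forbidden set (it trades A's pattern-major scanning for set construction and hashing, at similar measured cost). …
-- outside the precondition, e.g. on in_sft_language('a', ([],)): A returns False, B raises IndexError
import Mathlib
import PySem

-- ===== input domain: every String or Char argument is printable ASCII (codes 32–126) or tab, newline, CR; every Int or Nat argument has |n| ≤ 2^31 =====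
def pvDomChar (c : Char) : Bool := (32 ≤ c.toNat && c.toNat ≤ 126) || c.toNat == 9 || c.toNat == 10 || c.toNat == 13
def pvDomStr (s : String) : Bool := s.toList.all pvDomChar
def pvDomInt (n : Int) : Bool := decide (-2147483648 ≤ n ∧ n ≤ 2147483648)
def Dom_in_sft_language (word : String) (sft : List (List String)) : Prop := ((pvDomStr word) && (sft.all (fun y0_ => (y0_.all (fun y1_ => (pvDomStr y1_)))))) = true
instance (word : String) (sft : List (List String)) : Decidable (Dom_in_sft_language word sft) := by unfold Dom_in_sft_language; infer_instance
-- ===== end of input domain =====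

-- B replaces A's per-pattern position scans by a factor index: it builds the set of all
-- factors of the word of each distinct forbidden length once, and intersects it with the
-- forbidden set (an alternative strategy of similar measured cost).

-- ===== PORT A =====
def in_sft_language (word : String) (sft : List (List String)) : Bool :=
  match sft with
  | alphabet :: forbidden :: _ =>
      let wl := word.toList
      -- for a in word: if a not in sft[0]: return False
      if wl.any (fun a => !(alphabet.contains (String.ofList [a]))) then false
      -- for f in sft[1]: for i in range(len(word)-len(f)+1): if word[i:i+len(f)] == f: return False
      else if forbidden.any (fun f =>
          (PySem.List.pyRange 0 ((wl.length : Int) - (f.toList.length : Int) + 1) 1).any (fun i =>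
            PySem.List.slice wl (some i) (some (i + (f.toList.length : Int))) == f.toList))
        then false else true
  | _ => false  -- sft[0] / sft[1] would raise IndexError: excluded by Pre_

-- ===== PORT B =====
def in_sft_language_alt (word : String) (sft : List (List String)) : Bool :=
  -- alphabet, forbidden = sft[0], sft[1]  (pyGet?: none = IndexError, excluded by Pre_)
  match PySem.List.pyGet? sft 0, PySem.List.pyGet? sft 1 with
  | some alphabet, some forbidden =>
      let wl := word.toList
      -- if set(word) - set(alphabet): return False
      let bad := PySem.Set.diff (PySem.Set.ofList (wl.map (fun a => String.ofList [a]))) (PySem.Set.ofList alphabet)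
      if bad.isEmpty then
        -- lengths = {len(f) for f in forbidden}
        let lengths : PySem.Set Int := PySem.Set.ofList (forbidden.map (fun f => (f.toList.length : Int)))
        -- factors = {word[i:i+L] for L in lengths for i in range(len(word)-L+1)}
        -- (iterating the 'lengths' set only to BUILD another set: membership is order-independent)
        let factors : PySem.Set String := PySem.Set.ofList (lengths.flatMap (fun L =>
          (PySem.List.pyRange 0 ((wl.length : Int) - L + 1) 1).map (fun i =>
            String.ofList (PySem.List.slice wl (some i) (some (i + L))))))
        -- return not (factors & set(forbidden))
        (PySem.Set.inter factors (PySem.Set.ofList forbidden)).isEmpty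
      else false
  | _, _ => false

-- ===== PRECONDITION & SPEC =====
-- Pre_ excludes sft with fewer than two components: there A raises IndexError (so does B), except that a
-- word character outside sft[0] can make A return False before sft[1] is ever read, while B reads sft[1] up front and raises.
def Pre_in_sft_language (_word : String) (sft : List (List String)) : Prop := 2 ≤ sft.length
instance (word : String) (sft : List (List String)) : Decidable (Pre_in_sft_language word sft) := by unfold Pre_in_sft_language; infer_instance
def pvWitness_in_sft_language : String × List (List String) := ("ab", [["a", "b"], ["bb"]])

def Spec_in_sft_language (word : String) (sft : List (List String)) (out : Bool) : Prop := out = in_sft_language_alt word sft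
instance (word : String) (sft : List (List String)) (out : Bool) : Decidable (Spec_in_sft_language word sft out) := by unfold Spec_in_sft_language; infer_instance

-- ===== CLAIM (what is proved, stated in full; the proofs are below) =====
def Claim_equal_in_sft_language : Prop := ∀ (word : String) (sft : List (List String)), Dom_in_sft_language word sft → Pre_in_sft_language word sft → Spec_in_sft_language word sft (in_sft_language word sft)

-- ===== LEMMAS AND PROOFS =====

-- A's alphabet scan answers the same question as B's set difference.
theorem chars_eq (wl : List Char) (alphabet : List String) :
    (wl.any (fun a => !(alphabet.contains (String.ofList [a])))) =
    !(PySem.Set.diff (PySem.Set.ofList (wl.map (fun a => String.ofList [a]))) (PySem.Set.ofList alphabet)).isEmpty := by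
  rw [Bool.eq_iff_iff]
  simp [List.any_eq_true, List.eq_nil_iff_forall_not_mem,
        PySem.Set.mem_diff, PySem.Set.mem_ofList]

-- the slice word[i:i+L] for 0 ≤ i, i+L ≤ |wl| is take-of-drop, of length L.
theorem slice_drop_take (wl : List Char) (i L : Int) (h0 : 0 ≤ i) (hL : 0 ≤ L) :
    PySem.List.slice wl (some i) (some (i + L)) = (wl.drop i.toNat).take L.toNat := by
  rw [PySem.List.slice_toNat (ha := h0) (hb := by omega)]
  congr 1
  omega

-- A's pattern-major scan finds a forbidden factor iff B's factor-set meets the forbidden set.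
theorem factors_eq (wl : List Char) (forbidden : List String) :
    (forbidden.any (fun f =>
        (PySem.List.pyRange 0 ((wl.length : Int) - (f.toList.length : Int) + 1) 1).any (fun i =>
          PySem.List.slice wl (some i) (some (i + (f.toList.length : Int))) == f.toList))) =
    !(PySem.Set.inter
        (PySem.Set.ofList ((PySem.Set.ofList (forbidden.map (fun f => (f.toList.length : Int)))).flatMap (fun L =>
          (PySem.List.pyRange 0 ((wl.length : Int) - L + 1) 1).map (fun i =>
            String.ofList (PySem.List.slice wl (some i) (some (i + L)))))))
        (PySem.Set.ofList forbidden)).isEmpty := by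
  rw [Bool.eq_iff_iff]
  simp only [List.any_eq_true, PySem.List.mem_pyRange_one, beq_iff_eq, Bool.not_eq_true',
    List.isEmpty_eq_false_iff_exists_mem,
    PySem.Set.mem_inter, PySem.Set.mem_ofList, List.mem_flatMap, List.mem_map]
  constructor
  · rintro ⟨f, hf, i, ⟨h0, hlt⟩, hsl⟩
    exact ⟨f, ⟨(f.toList.length : Int), ⟨f, hf, rfl⟩, i, ⟨h0, hlt⟩,
      by rw [hsl, String.ofList_toList]⟩, hf⟩
  · rintro ⟨s, ⟨L, hL, i, ⟨h0, hlt⟩, hs⟩, hsf⟩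
    have hL0 : 0 ≤ L := by obtain ⟨f', _, rfl⟩ := hL; positivity
    have hts : s.toList = (wl.drop i.toNat).take L.toNat := by
      rw [← hs, slice_drop_take wl i L h0 hL0]; simp
    have hlen : s.toList.length = L.toNat := by rw [hts]; simp; omega
    refine ⟨s, hsf, i, ⟨h0, by omega⟩, ?_⟩
    rw [slice_drop_take wl i _ h0 (by positivity), Int.toNat_natCast, hlen]
    exact hts.symm

-- ===== VERDICT (by name: the statement is the Claim_ definition above) =====
theorem in_sft_language_spec : Claim_equal_in_sft_language := by
  intro word sft _ hpre
  unfold Spec_in_sft_language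
  match sft with
  | [] => simp [Pre_in_sft_language] at hpre
  | [_] => simp [Pre_in_sft_language] at hpre
  | alphabet :: forbidden :: rest =>
      have ha : PySem.List.pyGet? (alphabet::forbidden::rest) 0 = some alphabet := by simp [pysem]
      have hf : PySem.List.pyGet? (alphabet::forbidden::rest) 1 = some forbidden := by simp [pysem]
      simp only [in_sft_language, in_sft_language_alt, ha, hf]
      rw [chars_eq, factors_eq]
      cases h1 : (PySem.Set.diff (PySem.Set.ofList (word.toList.map (fun a => String.ofList [a]))) (PySem.Set.ofList alphabet)).isEmpty <;>
        cases h2 : (PySem.Set.inter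
          (PySem.Set.ofList ((PySem.Set.ofList (forbidden.map (fun f => (f.toList.length : Int)))).flatMap (fun L =>
            (PySem.List.pyRange 0 ((word.toList.length : Int) - L + 1) 1).map (fun i =>
              String.ofList (PySem.List.slice word.toList (some i) (some (i + L)))))))
          (PySem.Set.ofList forbidden)).isEmpty <;> simp
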